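-- pv_equiv track=rewrite | github.com/abiyaddisM/A2SV-Questions | Week 7/Day 6/Codeforces - A2SV Remote Contest 7/F. Timelines Converge – The Quantum Fold.py | helper
-- ===== SOURCE A (Python) =====
-- def helper(arr):
--     l = 0
--     for r in range(len(arr)):
--         a1 = arr[l: r + 1]
--         a2 = arr[r + 1: r + 1 + (r - l) + 1]
--         a2 = a2[::-1]
--         if a1 == a2:
--             l = r + 1
--     return l
-- ===== SOURCE B (Python) =====
-- def helper(arr):
--     # Exact windowed-palindrome test via big-integer positional codes:
--     # each candidate window comparison becomes one O(1)-per-limb integer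
--     # equality instead of building and reversing slices.
--     n = len(arr)
--     SH = 1 << 31
--     pref = [0]
--     for i in range(n):
--         pref.append(pref[i] + ((arr[i] + SH) << (33 * i)))
--     suf = [0]
--     for i in range(n):
--         suf.append(suf[i] + ((arr[i] + SH) << (33 * (n - 1 - i))))
--     l = 0
--     for r in range(n):
--         m = 2 * r + 1 - l
--         if m < n and (pref[r + 1] - pref[l]) >> (33 * l) == (suf[m + 1] - suf[r + 1]) >> (33 * (n - 1 - m)):
--             l = r + 1
--     return l
-- ===== Notes on version B (the rewrite author's own statement) =====
-- stated objective: alternative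
-- what changed: Replaces A's per-step slice/reverse/compare of two windows with exact big-integer positional codes: two precomputed prefix/suffix code arrays turn each reversed-window equality test into a single integer comparison (a collision-free 'rolling hash' in base 2^33).
import Mathlib
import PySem

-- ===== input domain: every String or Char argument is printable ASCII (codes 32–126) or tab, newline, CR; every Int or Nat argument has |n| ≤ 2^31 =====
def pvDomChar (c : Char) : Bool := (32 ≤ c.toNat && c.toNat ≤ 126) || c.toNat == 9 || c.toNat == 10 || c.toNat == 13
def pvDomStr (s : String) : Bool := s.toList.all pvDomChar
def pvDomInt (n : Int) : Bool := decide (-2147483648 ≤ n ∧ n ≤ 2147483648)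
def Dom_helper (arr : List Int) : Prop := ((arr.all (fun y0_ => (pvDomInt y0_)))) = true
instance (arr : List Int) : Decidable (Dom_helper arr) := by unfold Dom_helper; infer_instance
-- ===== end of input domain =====

-- B replaces A's per-step slice-build-reverse-compare with exact big-integer positional
-- codes (prefix/suffix) so each window test is one integer comparison; alternative algorithm,
-- not measured faster (Python bigint constants), return value identical on the whole domain.

-- ===== PORT A =====
def helper (arr : List Int) : Int :=
  (PySem.List.pyRange 0 (arr.length : Int) 1).foldl (fun l r =>
    let a1 := PySem.List.slice arr (some l) (some (r + 1))
    let a2 := PySem.List.slice arr (some (r + 1)) (some (r + 1 + (r - l) + 1))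
    -- a2[::-1] is reverse (PySem.List.slice?_none_none_neg_one)
    let a2 := a2.reverse
    if a1 = a2 then r + 1 else l) 0

-- ===== PORT B =====
-- pref.append(pref[i] + ((arr[i] + 2^31) << (33 * i)))  — structural scan carrying i and the last entry
def prefAux (xs : List Int) (i : Nat) (acc : Int) : List Int :=
  match xs with
  | [] => [acc]
  | x :: t => acc :: prefAux t (i + 1) (acc + (x + 2 ^ 31) * 2 ^ (33 * i))

-- suf.append(suf[i] + ((arr[i] + 2^31) << (33 * (n - 1 - i))))
def sufAux (n : Nat) (xs : List Int) (i : Nat) (acc : Int) : List Int :=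
  match xs with
  | [] => [acc]
  | x :: t => acc :: sufAux n t (i + 1) (acc + (x + 2 ^ 31) * 2 ^ (33 * (n - 1 - i)))

def helper_alt (arr : List Int) : Int :=
  let n := arr.length
  let pref := prefAux arr 0 0
  let suf := sufAux n arr 0 0
  (((List.range n).foldl (fun l r =>
    let m := 2 * r + 1 - l
    if m < n ∧ PySem.Int.floordiv (pref.getD (r + 1) 0 - pref.getD l 0) (2 ^ (33 * l))
        = PySem.Int.floordiv (suf.getD (m + 1) 0 - suf.getD (r + 1) 0) (2 ^ (33 * (n - 1 - m)))
    then r + 1 else l) 0 : Nat) : Int)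

-- ===== PRECONDITION & SPEC =====
def Spec_helper (arr : List Int) (out : Int) : Prop := out = helper_alt arr
instance (arr : List Int) (out : Int) : Decidable (Spec_helper arr out) := by unfold Spec_helper; infer_instance

-- ===== CLAIM (what is proved, stated in full; the proofs are below) =====
def Claim_equal_helper : Prop := ∀ (arr : List Int), Dom_helper arr → Spec_helper arr (helper arr)

-- ===== LEMMAS AND PROOFS =====

-- positional code of a digit list (digit = x + 2^31, base 2^33)
def code (xs : List Int) : Int := xs.foldr (fun x a => (x + 2 ^ 31) + 2 ^ 33 * a) 0

def rcode (xs : List Int) : Int := code xs.reverse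

def Bnd (xs : List Int) : Prop := ∀ x ∈ xs, -2 ^ 31 ≤ x ∧ x ≤ 2 ^ 31

theorem code_nil : code [] = 0 := rfl
theorem code_cons (x : Int) (t : List Int) : code (x :: t) = (x + 2 ^ 31) + 2 ^ 33 * code t := rfl

theorem code_append (xs ys : List Int) :
    code (xs ++ ys) = code xs + 2 ^ (33 * xs.length) * code ys := by
  induction xs with
  | nil => simp [code_nil]
  | cons x t ih =>
      simp only [List.cons_append, code_cons, ih, List.length_cons]
      have : (2 : Int) ^ (33 * (t.length + 1)) = 2 ^ 33 * 2 ^ (33 * t.length) := by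
        rw [← pow_add]; ring_nf
      rw [this]; ring

theorem rcode_append (xs ys : List Int) :
    rcode (xs ++ ys) = rcode ys + 2 ^ (33 * ys.length) * rcode xs := by
  simp only [rcode, List.reverse_append, code_append, List.length_reverse]

theorem rcode_cons (x : Int) (t : List Int) :
    rcode (x :: t) = rcode t + 2 ^ (33 * t.length) * (x + 2 ^ 31) := by
  have h := rcode_append [x] t
  simpa [rcode, code_cons, code_nil] using h

theorem code_inj (xs ys : List Int) (hx : Bnd xs) (hy : Bnd ys)
    (hlen : xs.length = ys.length) : code xs = code ys ↔ xs = ys := by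
  induction xs generalizing ys with
  | nil => cases ys with
    | nil => simp
    | cons y t => simp at hlen
  | cons x t ih =>
      cases ys with
      | nil => simp at hlen
      | cons y u =>
          have hxb := hx x (by simp)
          have hyb := hy y (by simp)
          have htb : Bnd t := fun z hz => hx z (by simp [hz])
          have hub : Bnd u := fun z hz => hy z (by simp [hz])
          have hl : t.length = u.length := by simpa using hlen
          constructor
          · intro h
            rw [code_cons, code_cons] at h
            have hxy : x = y ∧ code t = code u := by constructor <;> omega
            have := (ih u htb hub hl).mp hxy.2
            simp [hxy.1, this]
          · intro h; rw [h]

theorem prefAux_getD (xs : List Int) (i : Nat) (acc : Int) (j : Nat) (hj : j ≤ xs.length) :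
    (prefAux xs i acc).getD j 0 = acc + 2 ^ (33 * i) * code (xs.take j) := by
  induction xs generalizing i acc j with
  | nil =>
      have : j = 0 := by simpa using hj
      subst this
      simp [prefAux, code_nil]
  | cons x t ih =>
      cases j with
      | zero => simp [prefAux, code_nil]
      | succ j =>
          have hj' : j ≤ t.length := by simpa using hj
          simp only [prefAux, List.getD_cons_succ, ih _ _ _ hj', List.take_succ_cons, code_cons]
          have : (2 : Int) ^ (33 * (i + 1)) = 2 ^ (33 * i) * 2 ^ 33 := by
            rw [← pow_add]; ring_nf
          rw [this]; ring

theorem sufAux_getD (n : Nat) (xs : List Int) (i : Nat) (acc : Int) (j : Nat)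
    (hn : i + xs.length ≤ n) (hj : j ≤ xs.length) :
    (sufAux n xs i acc).getD j 0 = acc + 2 ^ (33 * (n - i - j)) * rcode (xs.take j) := by
  induction xs generalizing i acc j with
  | nil =>
      have : j = 0 := by simpa using hj
      subst this
      simp [sufAux, rcode, code_nil]
  | cons x t ih =>
      cases j with
      | zero => simp [sufAux, rcode, code_nil]
      | succ j =>
          have hj' : j ≤ t.length := by simpa using hj
          have hn' : (i + 1) + t.length ≤ n := by simp at hn; omega
          simp only [sufAux, List.getD_cons_succ, ih _ _ _ hn' hj', List.take_succ_cons,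
            rcode_cons, List.length_take, Nat.min_eq_left hj']
          have e1 : (2 : Int) ^ (33 * (n - i - (j + 1))) * 2 ^ (33 * j) = 2 ^ (33 * (n - 1 - i)) := by
            rw [← pow_add]; congr 1; omega
          have e2 : n - (i + 1) - j = n - i - (j + 1) := by omega
          rw [e2]
          rw [← e1]; ring

theorem fd_cancel (k : Nat) (c : Int) : PySem.Int.floordiv (2 ^ k * c) (2 ^ k) = c := by
  rw [PySem.Int.floordiv_eq_ediv_of_pos (by positivity)]
  exact Int.mul_ediv_cancel_left c (by positivity)

theorem pref_diff (arr : List Int) (l r : Nat) (hlr : l ≤ r + 1) (hr : r + 1 ≤ arr.length) :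
    code (arr.take (r + 1)) - code (arr.take l)
      = 2 ^ (33 * l) * code ((arr.drop l).take (r + 1 - l)) := by
  have h : arr.take (r + 1) = arr.take l ++ (arr.drop l).take (r + 1 - l) := by
    have : l + (r + 1 - l) = r + 1 := by omega
    rw [← this, List.take_add]
    simp
  rw [h, code_append, List.length_take, Nat.min_eq_left (by omega)]
  ring

theorem suf_diff (arr : List Int) (r m : Nat) (hrm : r ≤ m) (hm : m + 1 ≤ arr.length) :
    2 ^ (33 * (arr.length - (m + 1))) * rcode (arr.take (m + 1))
      - 2 ^ (33 * (arr.length - (r + 1))) * rcode (arr.take (r + 1))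
      = 2 ^ (33 * (arr.length - 1 - m)) * rcode ((arr.drop (r + 1)).take (m - r)) := by
  have h : arr.take (m + 1) = arr.take (r + 1) ++ (arr.drop (r + 1)).take (m - r) := by
    have : (r + 1) + (m - r) = m + 1 := by omega
    rw [← this, List.take_add]
  have hlen : ((arr.drop (r + 1)).take (m - r)).length = m - r := by
    simp [List.length_take, List.length_drop]
    omega
  rw [h, rcode_append, hlen]
  have e1 : (2 : Int) ^ (33 * (arr.length - (m + 1))) * 2 ^ (33 * (m - r))
      = 2 ^ (33 * (arr.length - (r + 1))) := by
    rw [← pow_add]; congr 1; omega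
  have e2 : arr.length - (m + 1) = arr.length - 1 - m := by omega
  rw [← e2, mul_add, ← mul_assoc, e1]
  ring

theorem Bnd_of_sub {arr xs : List Int} (hB : Bnd arr) (h : ∀ x ∈ xs, x ∈ arr) : Bnd xs :=
  fun x hx => hB x (h x hx)

theorem cond_iff (arr : List Int) (hB : Bnd arr) (l r : Nat) (hlr : l ≤ r) (hr : r < arr.length) :
    ((arr.drop l).take (r + 1 - l) = ((arr.drop (r + 1)).take (2 * r + 2 - l - (r + 1))).reverse)
    ↔ (2 * r + 1 - l < arr.length ∧
       PySem.Int.floordiv ((prefAux arr 0 0).getD (r + 1) 0 - (prefAux arr 0 0).getD l 0) (2 ^ (33 * l))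
       = PySem.Int.floordiv ((sufAux arr.length arr 0 0).getD ((2 * r + 1 - l) + 1) 0 - (sufAux arr.length arr 0 0).getD (r + 1) 0) (2 ^ (33 * (arr.length - 1 - (2 * r + 1 - l))))) := by
  set n := arr.length with hn
  set m := 2 * r + 1 - l with hm
  have hmr : m - r = r + 1 - l := by omega
  have he : 2 * r + 2 - l - (r + 1) = m - r := by omega
  set seg1 := (arr.drop l).take (r + 1 - l) with hseg1
  set seg2 := (arr.drop (r + 1)).take (m - r) with hseg2
  rw [he]
  have hlen1 : seg1.length = r + 1 - l := by
    simp [hseg1, List.length_take, List.length_drop]; omega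
  have hp1 := prefAux_getD arr 0 0 (r + 1) (by omega)
  have hp2 := prefAux_getD arr 0 0 l (by omega)
  have hfd1 : PySem.Int.floordiv ((prefAux arr 0 0).getD (r + 1) 0 - (prefAux arr 0 0).getD l 0) (2 ^ (33 * l)) = code seg1 := by
    rw [hp1, hp2]
    simp only [Nat.mul_zero, pow_zero, one_mul, zero_add]
    rw [pref_diff arr l r (by omega) (by omega), ← hseg1, fd_cancel]
  by_cases hcase : m < n
  · -- both windows have full length r+1-l
    have hlen2 : seg2.length = m - r := by
      simp [hseg2, List.length_take, List.length_drop]; omega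
    have hs1 := sufAux_getD n arr 0 0 (m + 1) (by omega) (by omega)
    have hs2 := sufAux_getD n arr 0 0 (r + 1) (by omega) (by omega)
    have hfd2 : PySem.Int.floordiv ((sufAux n arr 0 0).getD (m + 1) 0 - (sufAux n arr 0 0).getD (r + 1) 0) (2 ^ (33 * (n - 1 - m))) = rcode seg2 := by
      rw [hs1, hs2]
      simp only [Nat.sub_zero, zero_add]
      rw [suf_diff arr r m (by omega) (by omega), ← hseg2, fd_cancel]
    rw [hfd1, hfd2]
    have hbs1 : Bnd seg1 := Bnd_of_sub hB (by
      intro x hx; exact List.mem_of_mem_drop (List.mem_of_mem_take hx))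
    have hbs2 : Bnd seg2.reverse := Bnd_of_sub hB (by
      intro x hx
      exact List.mem_of_mem_drop (List.mem_of_mem_take (List.mem_reverse.mp hx)))
    have hinj := code_inj seg1 seg2.reverse hbs1 hbs2 (by
      rw [hlen1, List.length_reverse, hlen2]; omega)
    rw [show rcode seg2 = code seg2.reverse from rfl] at *
    constructor
    · intro h; exact ⟨hcase, hinj.mpr h⟩
    · intro h; exact hinj.mp h.2
  · -- truncated second window: lengths differ, both sides false
    constructor
    · intro h
      have hl2 := congrArg List.length h
      rw [hlen1, List.length_reverse, List.length_take, List.length_drop,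
        Nat.min_eq_right (show arr.length - (r + 1) ≤ m - r by omega)] at hl2
      omega
    · intro h; exact absurd h.1 hcase

theorem step_eq (arr : List Int) (hB : Bnd arr) (l r : Nat) (hlr : l ≤ r) (hr : r < arr.length) :
    (if PySem.List.slice arr (some (l : Int)) (some ((r : Int) + 1))
        = (PySem.List.slice arr (some ((r : Int) + 1)) (some ((r : Int) + 1 + ((r : Int) - (l : Int)) + 1))).reverse
      then (r : Int) + 1 else (l : Int))
    = (((if 2 * r + 1 - l < arr.length ∧
            PySem.Int.floordiv ((prefAux arr 0 0).getD (r + 1) 0 - (prefAux arr 0 0).getD l 0) (2 ^ (33 * l))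
            = PySem.Int.floordiv ((sufAux arr.length arr 0 0).getD ((2 * r + 1 - l) + 1) 0 - (sufAux arr.length arr 0 0).getD (r + 1) 0) (2 ^ (33 * (arr.length - 1 - (2 * r + 1 - l))))
          then r + 1 else l : Nat)) : Int) := by
  have c1 : ((r : Int) + 1) = ((r + 1 : Nat) : Int) := by push_cast; ring
  have c2 : ((r : Int) + 1 + ((r : Int) - (l : Int)) + 1) = ((2 * r + 2 - l : Nat) : Int) := by omega
  rw [c2, c1, PySem.List.slice_natCast, PySem.List.slice_natCast]
  have hc := cond_iff arr hB l r hlr hr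
  by_cases h : (arr.drop l).take (r + 1 - l) = ((arr.drop (r + 1)).take (2 * r + 2 - l - (r + 1))).reverse
  · rw [if_pos h, if_pos (hc.mp h)]
  · rw [if_neg h, if_neg (fun hb => h (hc.mpr hb))]

theorem loop_eq (arr : List Int) (hB : Bnd arr) :
    ∀ (c s lB : Nat), lB ≤ s → s + c = arr.length →
    (List.range' s c).foldl (fun (l : Int) (r : Nat) =>
        if PySem.List.slice arr (some l) (some ((r : Int) + 1))
            = (PySem.List.slice arr (some ((r : Int) + 1)) (some ((r : Int) + 1 + ((r : Int) - l) + 1))).reverse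
        then (r : Int) + 1 else l) (lB : Int)
    = (((List.range' s c).foldl (fun (l r : Nat) =>
        if 2 * r + 1 - l < arr.length ∧
            PySem.Int.floordiv ((prefAux arr 0 0).getD (r + 1) 0 - (prefAux arr 0 0).getD l 0) (2 ^ (33 * l))
            = PySem.Int.floordiv ((sufAux arr.length arr 0 0).getD ((2 * r + 1 - l) + 1) 0 - (sufAux arr.length arr 0 0).getD (r + 1) 0) (2 ^ (33 * (arr.length - 1 - (2 * r + 1 - l))))
        then r + 1 else l) lB : Nat) : Int) := by
  intro c
  induction c with
  | zero => intro s lB _ _; simp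
  | succ c ih =>
      intro s lB hls hsc
      rw [List.range'_succ, List.foldl_cons, List.foldl_cons]
      rw [step_eq arr hB lB s hls (by omega)]
      exact ih (s + 1) _ (by split_ifs <;> omega) (by omega)

-- ===== VERDICT (by name: the statement is the Claim_ definition above) =====
theorem helper_spec : Claim_equal_helper := by
  intro arr hD
  show helper arr = helper_alt arr
  have hB : Bnd arr := by
    intro x hx
    have h := (List.all_eq_true.mp hD) x hx
    unfold pvDomInt at h
    have h2 := of_decide_eq_true h
    exact ⟨by omega, by omega⟩
  have hrange : PySem.List.pyRange 0 (arr.length : Int) 1 = (List.range arr.length).map (fun (k : Nat) => (k : Int)) := by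
    rw [PySem.List.pyRange_one]
    have h0 : ((arr.length : Int) - 0).toNat = arr.length := by omega
    rw [h0]
    refine List.map_congr_left (fun k _ => ?_)
    simp
  unfold helper helper_alt
  rw [hrange]
  simp only [List.range_eq_range']
  simp only [List.foldl_map]
  have main := loop_eq arr hB arr.length 0 0 (le_refl 0) (by omega)
  rw [Nat.cast_zero] at main
  exact main
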